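-- pv_equiv track=rewrite | github.com/hichamHW/find_max_seq_python | main.py | findSeq
-- ===== SOURCE A (Python) =====
-- def findSeq(M):
--     row = len(M)
--     col = len(M[0])
--     S = [[0 for k in range(col)] for l in range(row)]
--
--     for i in range(1, row):
--         for j in range(1, col):
--             if (M[i][j] == '.'):
--                 S[i][j] = min(S[i][j - 1], S[i - 1][j],
--                               S[i - 1][j - 1]) + 1
--             else:
--                 S[i][j] = 0
--
--
--     m_s = S[0][0]
--     m_i = 0
--     m_j = 0
--     for i in range(row):
--         for j in range(col):
--             if (m_s < S[i][j]):
--                 m_s = S[i][j]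
--                 m_i = i
--                 m_j = j
--
--     for i in range(m_i, m_i - m_s, -1):
--         for j in range(m_j, m_j - m_s, -1):
--             M[i][j] = '#'
--     return M
-- ===== SOURCE B (Python) =====
-- def findSeq(M):
--     rows = len(M)
--     cols = len(M[0])
--     best = 0
--     bi = 0
--     bj = 0
--     for i in range(1, rows):
--         for j in range(1, cols):
--             # grow the square ending at (i, j): extend side s -> s+1 while the
--             # new L-shaped layer is all dots and the square stays inside the
--             # interior (side capped at min(i, j))
--             s = 0
--             while s < min(i, j):
--                 if all(M[i - s][j - b] == '.' for b in range(s + 1)) and \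
--                    all(M[i - a][j - s] == '.' for a in range(s + 1)):
--                     s += 1
--                 else:
--                     break
--             if best < s:
--                 best = s
--                 bi = i
--                 bj = j
--     for a in range(best):
--         for b in range(best):
--             M[bi - a][bj - b] = '#'
--     return M
-- ===== Notes on version B (the rewrite author's own statement) =====
-- stated objective: alternative
-- what changed: Replaced the O(rc) dynamic-programming table (min-recurrence plus a separate full-grid max scan) by a table-free direct search: each interior cell grows its largest all-dot square layer by layer and the running best with row-major tie-break is kept in the same pass.
import Mathlib
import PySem

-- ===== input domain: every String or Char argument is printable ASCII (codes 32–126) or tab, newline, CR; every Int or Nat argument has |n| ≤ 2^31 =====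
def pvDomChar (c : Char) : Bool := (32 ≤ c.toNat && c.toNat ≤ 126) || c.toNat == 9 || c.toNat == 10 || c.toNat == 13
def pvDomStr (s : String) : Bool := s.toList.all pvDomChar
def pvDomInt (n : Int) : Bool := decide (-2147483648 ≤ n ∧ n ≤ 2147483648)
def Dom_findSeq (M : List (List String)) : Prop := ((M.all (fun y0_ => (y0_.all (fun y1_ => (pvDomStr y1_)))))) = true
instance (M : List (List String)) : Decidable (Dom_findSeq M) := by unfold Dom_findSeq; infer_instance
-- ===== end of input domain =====

-- B replaces A's DP table + separate max scan by a table-free per-cell square-growing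
-- search fused with the max scan ('alternative'; same return value). Both Pythons
-- mutate M in place identically; the theorems are about the return value.

-- ===== PORT A =====
-- M[i][j] read (in range under Pre_; pyGetD is Python-exact for in-range indices)
def pvGet2S (M : List (List String)) (i j : Int) : String :=
  PySem.List.pyGetD (PySem.List.pyGetD M i []) j ""

def pvGet2 (S : List (List Int)) (i j : Int) : Int :=
  PySem.List.pyGetD (PySem.List.pyGetD S i []) j 0

-- xs[i] = v for an in-range index i (exact there: Python raises out of range, Pre_ excludes)
def pvSet {α : Type} (xs : List α) (i : Int) (v : α) : List α :=
  if 0 ≤ i then xs.set i.toNat v else xs.set (xs.length - (-i).toNat) v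

def pvSet2 {α : Type} (xss : List (List α)) (i j : Int) (v : α) : List (List α) :=
  pvSet xss i (pvSet (PySem.List.pyGetD xss i []) j v)

def findSeq (M : List (List String)) : List (List String) :=
  let row : Int := M.length
  let col : Int := (PySem.List.pyGetD M 0 []).length
  let S0 : List (List Int) :=
    (PySem.List.pyRange 0 row 1).map (fun _ => (PySem.List.pyRange 0 col 1).map (fun _ => (0 : Int)))
  let S : List (List Int) :=
    (PySem.List.pyRange 1 row 1).foldl (fun S i =>
      (PySem.List.pyRange 1 col 1).foldl (fun S j =>
        if pvGet2S M i j == "." then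
          pvSet2 S i j (min (pvGet2 S i (j - 1)) (min (pvGet2 S (i - 1) j) (pvGet2 S (i - 1) (j - 1))) + 1)
        else
          pvSet2 S i j 0) S) S0
  let ms : Int × Int × Int :=
    (PySem.List.pyRange 0 row 1).foldl (fun st i =>
      (PySem.List.pyRange 0 col 1).foldl (fun st j =>
        if st.1 < pvGet2 S i j then (pvGet2 S i j, i, j) else st) st)
      (pvGet2 S 0 0, 0, 0)
  (PySem.List.pyRange ms.2.1 (ms.2.1 - ms.1) (-1)).foldl (fun M i =>
    (PySem.List.pyRange ms.2.2 (ms.2.2 - ms.1) (-1)).foldl (fun M j =>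
      pvSet2 M i j "#") M) M

-- ===== PORT B =====
-- the L-shaped layer that extends the all-dot square ending at (i,j) from side s to s+1
def pvLayerOK (M : List (List String)) (i j s : Int) : Bool :=
  ((PySem.List.pyRange 0 (s + 1) 1).all (fun b => pvGet2S M (i - s) (j - b) == ".")) &&
  ((PySem.List.pyRange 0 (s + 1) 1).all (fun a => pvGet2S M (i - a) (j - s) == "."))

-- the 'while s < min(i, j)' growth loop; fuel = (min i j).toNat - s counts the remaining iterations
def pvGrow (M : List (List String)) (i j s : Int) : Nat → Int
  | 0 => s
  | fuel + 1 => if pvLayerOK M i j s then pvGrow M i j (s + 1) fuel else s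

def findSeq_alt (M : List (List String)) : List (List String) :=
  let rows : Int := M.length
  let cols : Int := (PySem.List.pyGetD M 0 []).length
  let bst : Int × Int × Int :=
    (PySem.List.pyRange 1 rows 1).foldl (fun st i =>
      (PySem.List.pyRange 1 cols 1).foldl (fun st j =>
        let s := pvGrow M i j 0 (min i j).toNat
        if st.1 < s then (s, i, j) else st) st)
      (0, 0, 0)
  (PySem.List.pyRange 0 bst.1 1).foldl (fun M a =>
    (PySem.List.pyRange 0 bst.1 1).foldl (fun M b =>
      pvSet2 M (bst.2.1 - a) (bst.2.2 - b) "#") M) M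

-- ===== PRECONDITION & SPEC =====
-- Pre_ is exactly the set of inputs on which the Python A returns: A raises IndexError on
-- empty M (len(M[0])), on an empty first row (S[0][0]), and — when the grid has at least
-- 2 rows and 2 columns, so the DP loop actually reads M — on a later row shorter than M[0].
def Pre_findSeq (M : List (List String)) : Prop :=
  M ≠ [] ∧ M.headI ≠ [] ∧
    (2 ≤ M.length → 2 ≤ M.headI.length → ∀ r ∈ M.tail, M.headI.length ≤ r.length)
instance (M : List (List String)) : Decidable (Pre_findSeq M) := by
  unfold Pre_findSeq; infer_instance

def pvWitness_findSeq : List (List String) := [[".", "."], [".", "x"]]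

def Spec_findSeq (M : List (List String)) (out : List (List String)) : Prop := out = findSeq_alt M
instance (M : List (List String)) (out : List (List String)) : Decidable (Spec_findSeq M out) := by
  unfold Spec_findSeq; infer_instance

-- ===== CLAIM (what is proved, stated in full; the proofs are below) =====
def Claim_equal_findSeq : Prop :=
  ∀ (M : List (List String)), Dom_findSeq M → Pre_findSeq M → Spec_findSeq M (findSeq M)

-- ===== LEMMAS AND PROOFS =====

-- proof-side model: grid cell at natural indices (total; all proof uses are in range)
def cellN (M : List (List String)) (a b : Nat) : String := (M.getD a []).getD b ""

-- the s×s square whose bottom-right corner is (i, j) is all dots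
def sqOK (M : List (List String)) (i j s : Nat) : Bool :=
  (List.range s).all fun a => (List.range s).all fun b => cellN M (i - a) (j - b) == "."

-- largest all-dot square ending at (i, j) with side capped at min i j (A's interior-only DP)
def maxSide (M : List (List String)) (i j : Nat) : Nat :=
  Nat.findGreatest (fun s => sqOK M i j s = true) (min i j)

theorem sqOK_iff (M : List (List String)) (i j s : Nat) :
    sqOK M i j s = true ↔ ∀ a < s, ∀ b < s, cellN M (i - a) (j - b) = "." := by
  simp [sqOK]

theorem sqOK_zero (M : List (List String)) (i j : Nat) : sqOK M i j 0 = true := by simp [sqOK]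

theorem sqOK_mono (M : List (List String)) {i j s t : Nat} (h : s ≤ t)
    (ht : sqOK M i j t = true) : sqOK M i j s = true :=
  (sqOK_iff M i j s).mpr fun a ha b hb =>
    (sqOK_iff M i j t).mp ht a (lt_of_lt_of_le ha h) b (lt_of_lt_of_le hb h)

theorem maxSide_le (M : List (List String)) (i j : Nat) : maxSide M i j ≤ min i j :=
  Nat.findGreatest_le _

theorem maxSide_sqOK (M : List (List String)) (i j : Nat) :
    sqOK M i j (maxSide M i j) = true := by
  unfold maxSide
  exact Nat.findGreatest_spec (P := fun s => sqOK M i j s = true) (Nat.zero_le _) (sqOK_zero M i j)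

theorem le_maxSide (M : List (List String)) {i j k : Nat} (hk : k ≤ min i j)
    (h : sqOK M i j k = true) : k ≤ maxSide M i j :=
  Nat.le_findGreatest hk h

theorem maxSide_eq_of (M : List (List String)) {i j s : Nat} (hs : s ≤ min i j)
    (h1 : sqOK M i j s = true) (h2 : s = min i j ∨ sqOK M i j (s + 1) ≠ true) :
    maxSide M i j = s := by
  refine le_antisymm ?_ (le_maxSide M hs h1)
  rcases h2 with h2 | h2
  · exact h2 ▸ maxSide_le M i j
  · by_contra hlt
    exact h2 (sqOK_mono M (by omega) (maxSide_sqOK M i j))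

theorem maxSide_min_zero (M : List (List String)) {i j : Nat} (h : min i j = 0) :
    maxSide M i j = 0 :=
  Nat.le_zero.mp (h ▸ maxSide_le M i j)

theorem maxSide_not_dot (M : List (List String)) {i j : Nat} (h : cellN M i j ≠ ".") :
    maxSide M i j = 0 := by
  by_contra h0
  have hpos : 0 < maxSide M i j := Nat.pos_of_ne_zero h0
  have := (sqOK_iff M i j _).mp (maxSide_sqOK M i j) 0 hpos 0 hpos
  simp at this
  exact h this

theorem sqOK_shrink (M : List (List String)) {i j s : Nat}
    (h : sqOK M i j (s + 1) = true) :
    sqOK M i (j - 1) s = true ∧ sqOK M (i - 1) j s = true ∧ sqOK M (i - 1) (j - 1) s = true := by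
  have hb := (sqOK_iff M i j (s + 1)).mp h
  refine ⟨(sqOK_iff _ _ _ _).mpr fun a ha b hbb => ?_,
          (sqOK_iff _ _ _ _).mpr fun a ha b hbb => ?_,
          (sqOK_iff _ _ _ _).mpr fun a ha b hbb => ?_⟩
  · have : j - 1 - b = j - (b + 1) := by omega
    rw [this]; exact hb a (by omega) (b + 1) (by omega)
  · have : i - 1 - a = i - (a + 1) := by omega
    rw [this]; exact hb (a + 1) (by omega) b (by omega)
  · have h1 : i - 1 - a = i - (a + 1) := by omega
    have h2 : j - 1 - b = j - (b + 1) := by omega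
    rw [h1, h2]; exact hb (a + 1) (by omega) (b + 1) (by omega)

theorem sqOK_grow (M : List (List String)) {i j m : Nat}
    (hd : cellN M i j = ".") (h1 : sqOK M i (j - 1) m = true)
    (h2 : sqOK M (i - 1) j m = true) (h3 : sqOK M (i - 1) (j - 1) m = true) :
    sqOK M i j (m + 1) = true := by
  refine (sqOK_iff M i j (m + 1)).mpr fun a ha b hb => ?_
  rcases Nat.eq_zero_or_pos a with ha0 | hapos
  · rcases Nat.eq_zero_or_pos b with hb0 | hbpos
    · simpa [ha0, hb0] using hd
    · have : j - b = j - 1 - (b - 1) := by omega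
      rw [ha0, this]
      simpa using (sqOK_iff M i (j - 1) m).mp h1 0 (by omega) (b - 1) (by omega)
  · rcases Nat.eq_zero_or_pos b with hb0 | hbpos
    · have : i - a = i - 1 - (a - 1) := by omega
      rw [hb0, this]
      simpa using (sqOK_iff M (i - 1) j m).mp h2 (a - 1) (by omega) 0 (by omega)
    · have e1 : i - a = i - 1 - (a - 1) := by omega
      have e2 : j - b = j - 1 - (b - 1) := by omega
      rw [e1, e2]
      exact (sqOK_iff M (i - 1) (j - 1) m).mp h3 (a - 1) (by omega) (b - 1) (by omega)

-- the DP recurrence satisfied by maxSide (A's table values)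
theorem maxSide_rec (M : List (List String)) {i j : Nat} (hi : 1 ≤ i) (hj : 1 ≤ j) :
    maxSide M i j =
      if cellN M i j = "." then
        min (maxSide M i (j - 1)) (min (maxSide M (i - 1) j) (maxSide M (i - 1) (j - 1))) + 1
      else 0 := by
  split_ifs with hd
  · set m := min (maxSide M i (j - 1)) (min (maxSide M (i - 1) j) (maxSide M (i - 1) (j - 1))) with hm
    have hm1 : m ≤ maxSide M i (j - 1) := by omega
    have hm2 : m ≤ maxSide M (i - 1) j := by omega
    have hm3 : m ≤ maxSide M (i - 1) (j - 1) := by omega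
    have hble : m + 1 ≤ min i j := by
      have := maxSide_le M (i - 1) (j - 1)
      omega
    refine maxSide_eq_of M hble ?_ ?_
    · exact sqOK_grow M hd (sqOK_mono M hm1 (maxSide_sqOK M i (j - 1)))
        (sqOK_mono M hm2 (maxSide_sqOK M (i - 1) j))
        (sqOK_mono M hm3 (maxSide_sqOK M (i - 1) (j - 1)))
    · rcases Nat.eq_or_lt_of_le hble with he | hlt
      · exact Or.inl he
      · refine Or.inr fun hsq => ?_
        obtain ⟨q1, q2, q3⟩ := sqOK_shrink M hsq
        have b1 : m + 1 ≤ maxSide M i (j - 1) := le_maxSide M (by omega) q1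
        have b2 : m + 1 ≤ maxSide M (i - 1) j := le_maxSide M (by omega) q2
        have b3 : m + 1 ≤ maxSide M (i - 1) (j - 1) := le_maxSide M (by omega) q3
        omega
  · exact maxSide_not_dot M hd


theorem pvGet2S_natCast (M : List (List String)) (a b : Nat) :
    pvGet2S M (a : Int) (b : Int) = cellN M a b := by
  simp [pvGet2S, cellN, PySem.List.pyGetD_natCast]

theorem pvLayerOK_eq (M : List (List String)) {i j s : Nat} (hs : sqOK M i j s = true)
    (hlt : s < min i j) : pvLayerOK M (i : Int) (j : Int) (s : Int) = sqOK M i j (s + 1) := by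
  rw [Bool.eq_iff_iff]
  have hcast : ((s : Int) + 1) = ((s + 1 : Nat) : Int) := by push_cast; ring
  constructor
  · intro h
    simp only [pvLayerOK, Bool.and_eq_true, List.all_eq_true] at h
    obtain ⟨hrow, hcol⟩ := h
    refine (sqOK_iff M i j (s + 1)).mpr fun a ha b hb => ?_
    rcases Nat.lt_or_ge a s with has | has
    · rcases Nat.lt_or_ge b s with hbs | hbs
      · exact (sqOK_iff M i j s).mp hs a has b hbs
      · have hbeq : b = s := by omega
        have := hcol (a : Int) (by rw [PySem.List.mem_pyRange_one]; omega)
        rw [show ((i : Int) - (a : Int)) = ((i - a : Nat) : Int) by omega,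
            show ((j : Int) - (s : Int)) = ((j - s : Nat) : Int) by omega,
            pvGet2S_natCast] at this
        subst hbeq
        exact beq_iff_eq.mp this
    · have haeq : a = s := by omega
      have := hrow (b : Int) (by rw [PySem.List.mem_pyRange_one]; omega)
      rw [show ((i : Int) - (s : Int)) = ((i - s : Nat) : Int) by omega,
          show ((j : Int) - (b : Int)) = ((j - b : Nat) : Int) by omega,
          pvGet2S_natCast] at this
      subst haeq
      exact beq_iff_eq.mp this
  · intro h
    have hb := (sqOK_iff M i j (s + 1)).mp h
    simp only [pvLayerOK, Bool.and_eq_true, List.all_eq_true]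
    constructor
    · intro x hx
      rw [PySem.List.mem_pyRange_one] at hx
      obtain ⟨k, rfl⟩ : ∃ k : Nat, x = (k : Int) := ⟨x.toNat, by omega⟩
      rw [show ((i : Int) - (s : Int)) = ((i - s : Nat) : Int) by omega,
          show ((j : Int) - (k : Int)) = ((j - k : Nat) : Int) by omega,
          pvGet2S_natCast]
      exact beq_iff_eq.mpr (hb s (by omega) k (by omega))
    · intro x hx
      rw [PySem.List.mem_pyRange_one] at hx
      obtain ⟨k, rfl⟩ : ∃ k : Nat, x = (k : Int) := ⟨x.toNat, by omega⟩
      rw [show ((i : Int) - (k : Int)) = ((i - k : Nat) : Int) by omega,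
          show ((j : Int) - (s : Int)) = ((j - s : Nat) : Int) by omega,
          pvGet2S_natCast]
      exact beq_iff_eq.mpr (hb k (by omega) s (by omega))

theorem pvGrow_eq (M : List (List String)) {i j s : Nat} (f : Nat)
    (hs : sqOK M i j s = true) (hf : s + f = min i j) :
    pvGrow M (i : Int) (j : Int) (s : Int) f = ((maxSide M i j : Nat) : Int) := by
  induction f generalizing s with
  | zero =>
    have : maxSide M i j = s := maxSide_eq_of M (by omega) hs (Or.inl (by omega))
    rw [this]; rfl
  | succ f ih =>
    have hlt : s < min i j := by omega
    rw [pvGrow, pvLayerOK_eq M hs hlt]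
    by_cases hsq : sqOK M i j (s + 1) = true
    · rw [if_pos hsq, show ((s : Int) + 1) = ((s + 1 : Nat) : Int) by push_cast; ring]
      exact ih hsq (by omega)
    · rw [if_neg hsq]
      rw [maxSide_eq_of M (by omega) hs (Or.inr hsq)]

theorem pvGrow_val (M : List (List String)) (i j : Nat) :
    pvGrow M (i : Int) (j : Int) 0 (min (i : Int) (j : Int)).toNat =
      ((maxSide M i j : Nat) : Int) := by
  have h1 : (min (i : Int) (j : Int)).toNat = min i j := by omega
  have h2 : (0 : Int) = ((0 : Nat) : Int) := rfl
  rw [h1, h2]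
  exact pvGrow_eq M (min i j) (sqOK_zero M i j) (by omega)


-- ---- table layer: A's S table holds maxSide on every processed cell ----

def tabGet (S : List (List Int)) (a b : Nat) : Int := (S.getD a []).getD b 0

def Rect (S : List (List Int)) (row col : Nat) : Prop :=
  S.length = row ∧ ∀ r ∈ S, r.length = col

-- the set of cells the DP loop has filled before reaching (i, j) (plus the all-zero border)
def pvP (i j a b : Nat) : Bool :=
  a == 0 || b == 0 || decide (a < i) || (a == i && decide (b < j))

theorem pvP_iff (i j a b : Nat) :
    pvP i j a b = true ↔ (a = 0 ∨ b = 0 ∨ a < i ∨ (a = i ∧ b < j)) := by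
  simp [pvP]
  tauto

def pvInv (M : List (List String)) (S : List (List Int)) (row col i j : Nat) : Prop :=
  Rect S row col ∧
    ∀ a b : Nat, a < row → b < col → pvP i j a b = true →
      tabGet S a b = ((maxSide M a b : Nat) : Int)

theorem pvGet2_natCast (S : List (List Int)) (a b : Nat) :
    pvGet2 S (a : Int) (b : Int) = tabGet S a b := by
  simp [pvGet2, tabGet, PySem.List.pyGetD_natCast]

theorem pvSet2_natCast (S : List (List Int)) (i j : Nat) (v : Int) :
    pvSet2 S (i : Int) (j : Int) v = S.set i ((S.getD i []).set j v) := by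
  simp [pvSet2, pvSet, PySem.List.pyGetD_natCast]

theorem pvGetD_mem {α : Type} {S : List α} {i : Nat} {d : α} (h : i < S.length) :
    S.getD i d ∈ S := by
  rw [List.getD_eq_getElem?_getD, List.getElem?_eq_getElem h]
  exact List.getElem_mem h

theorem rect_set {S : List (List Int)} {row col i j : Nat} {v : Int}
    (hR : Rect S row col) (hi : i < row) :
    Rect (S.set i ((S.getD i []).set j v)) row col := by
  obtain ⟨hlen, hrows⟩ := hR
  refine ⟨by simp [hlen], fun r hr => ?_⟩
  rcases List.mem_or_eq_of_mem_set hr with hr | rfl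
  · exact hrows r hr
  · rw [List.length_set]
    exact hrows _ (pvGetD_mem (by omega))

theorem tabGet_set {S : List (List Int)} {row col i j : Nat} {v : Int}
    (hR : Rect S row col) (_hi : i < row) (hj : j < col) (a b : Nat) (hb : b < col) :
    tabGet (S.set i ((S.getD i []).set j v)) a b =
      if a = i ∧ b = j then v else tabGet S a b := by
  obtain ⟨hlen, hrows⟩ := hR
  have hrowlen : (S.getD i []).length = col := hrows _ (pvGetD_mem (by omega))
  by_cases ha : a = i
  · subst ha
    have h1 : (S.set a ((S.getD a []).set j v)).getD a [] = (S.getD a []).set j v := by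
      rw [List.getD_eq_getElem?_getD, List.getElem?_set_self (by omega)]
      rfl
    rw [tabGet, h1]
    by_cases hbj : b = j
    · subst hbj
      rw [List.getD_eq_getElem?_getD, List.getElem?_set_self (by omega)]
      simp
    · rw [List.getD_eq_getElem?_getD (l := (S.getD a []).set j v),
        List.getElem?_set_ne (by omega), if_neg (by tauto), tabGet,
        List.getD_eq_getElem?_getD (l := S.getD a [])]
  · rw [tabGet, List.getD_eq_getElem?_getD (l := S.set i ((S.getD i []).set j v)),
      List.getElem?_set_ne (by omega), if_neg (by tauto), tabGet,
      List.getD_eq_getElem?_getD (l := S)]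

theorem inv_write {M : List (List String)} {S : List (List Int)} {row col i j : Nat}
    (hirow : i < row) (hjcol : j < col)
    (h : pvInv M S row col i j) :
    pvInv M (S.set i ((S.getD i []).set j ((maxSide M i j : Nat) : Int))) row col i (j + 1) := by
  obtain ⟨hR, hval⟩ := h
  refine ⟨rect_set hR hirow, fun a b ha hb hp => ?_⟩
  rw [tabGet_set hR hirow hjcol a b hb]
  by_cases hij : a = i ∧ b = j
  · rw [if_pos hij, hij.1, hij.2]
  · rw [if_neg hij]
    refine hval a b ha hb ?_
    rw [pvP_iff] at hp ⊢
    rcases hp with h | h | h | ⟨h1, h2⟩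
    · tauto
    · tauto
    · tauto
    · right; right; right
      constructor
      · exact h1
      · rcases Nat.lt_or_ge b j with hlt | hge
        · exact hlt
        · exfalso; exact hij ⟨h1, by omega⟩

theorem dpCell_inv {M : List (List String)} {S : List (List Int)} {row col i j : Nat}
    (hi : 1 ≤ i) (hirow : i < row) (hj : 1 ≤ j) (hjcol : j < col)
    (h : pvInv M S row col i j) :
    pvInv M
      (if pvGet2S M (i : Int) (j : Int) == "." then
        pvSet2 S (i : Int) (j : Int)
          (min (pvGet2 S (i : Int) ((j : Int) - 1))
            (min (pvGet2 S ((i : Int) - 1) (j : Int)) (pvGet2 S ((i : Int) - 1) ((j : Int) - 1))) + 1)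
      else pvSet2 S (i : Int) (j : Int) 0) row col i (j + 1) := by
  have e1 : ((j : Int) - 1) = ((j - 1 : Nat) : Int) := by omega
  have e2 : ((i : Int) - 1) = ((i - 1 : Nat) : Int) := by omega
  rw [e1, e2, pvGet2S_natCast, pvGet2_natCast, pvGet2_natCast, pvGet2_natCast]
  obtain ⟨hR, hval⟩ := h
  have r1 : tabGet S i (j - 1) = ((maxSide M i (j - 1) : Nat) : Int) :=
    hval i (j - 1) hirow (by omega) (by rw [pvP_iff]; omega)
  have r2 : tabGet S (i - 1) j = ((maxSide M (i - 1) j : Nat) : Int) :=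
    hval (i - 1) j (by omega) hjcol (by rw [pvP_iff]; omega)
  have r3 : tabGet S (i - 1) (j - 1) = ((maxSide M (i - 1) (j - 1) : Nat) : Int) :=
    hval (i - 1) (j - 1) (by omega) (by omega) (by rw [pvP_iff]; omega)
  rw [r1, r2, r3]
  by_cases hd : cellN M i j = "."
  · rw [if_pos (by simpa using hd), pvSet2_natCast]
    have hv : (min ((maxSide M i (j - 1) : Nat) : Int)
        (min ((maxSide M (i - 1) j : Nat) : Int) ((maxSide M (i - 1) (j - 1) : Nat) : Int)) + 1)
        = ((maxSide M i j : Nat) : Int) := by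
      rw [maxSide_rec M hi hj, if_pos hd]
      push_cast
      omega
    rw [hv]
    exact inv_write hirow hjcol ⟨hR, hval⟩
  · rw [if_neg (by simpa using hd), pvSet2_natCast]
    have hv : (0 : Int) = ((maxSide M i j : Nat) : Int) := by
      rw [maxSide_not_dot M hd]; rfl
    rw [hv]
    exact inv_write hirow hjcol ⟨hR, hval⟩

theorem inv_next_row {M : List (List String)} {S : List (List Int)} {row col i : Nat}
    (h : pvInv M S row col i col) : pvInv M S row col (i + 1) 1 := by
  obtain ⟨hR, hval⟩ := h
  refine ⟨hR, fun a b ha hb hp => ?_⟩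
  refine hval a b ha hb ?_
  rw [pvP_iff] at hp ⊢
  omega

theorem dpInner_inv (M : List (List String)) {row col i : Nat}
    (hi : 1 ≤ i) (hirow : i < row) (k : Nat) :
    ∀ (j : Nat) (S : List (List Int)), j + k = col → 1 ≤ j → pvInv M S row col i j →
    pvInv M ((PySem.List.pyRange (j : Int) (col : Int) 1).foldl (fun S jj =>
        if pvGet2S M (i : Int) jj == "." then
          pvSet2 S (i : Int) jj
            (min (pvGet2 S (i : Int) (jj - 1))
              (min (pvGet2 S ((i : Int) - 1) jj) (pvGet2 S ((i : Int) - 1) (jj - 1))) + 1)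
        else pvSet2 S (i : Int) jj 0) S) row col i col := by
  induction k with
  | zero =>
    intro j S hjk hj hinv
    have : j = col := by omega
    subst this
    rw [show PySem.List.pyRange (j : Int) (j : Int) 1 = [] from
      PySem.List.pyRange_one_eq_nil le_rfl]
    exact hinv
  | succ k ih =>
    intro j S hjk hj hinv
    rw [PySem.List.pyRange_one_cons (by omega : (j : Int) < (col : Int))]
    rw [List.foldl_cons]
    have hstep := dpCell_inv hi hirow hj (by omega : j < col) hinv
    have : ((j : Int) + 1) = ((j + 1 : Nat) : Int) := by omega
    rw [this]
    exact ih (j + 1) _ (by omega) (by omega) hstep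

theorem dpOuter_inv (M : List (List String)) {row col : Nat} (hcol : 1 ≤ col) (k : Nat) :
    ∀ (i : Nat) (S : List (List Int)), i + k = row → 1 ≤ i → pvInv M S row col i 1 →
    pvInv M ((PySem.List.pyRange (i : Int) (row : Int) 1).foldl (fun S ii =>
        (PySem.List.pyRange 1 (col : Int) 1).foldl (fun S jj =>
          if pvGet2S M ii jj == "." then
            pvSet2 S ii jj
              (min (pvGet2 S ii (jj - 1))
                (min (pvGet2 S (ii - 1) jj) (pvGet2 S (ii - 1) (jj - 1))) + 1)
          else pvSet2 S ii jj 0) S) S) row col row 1 := by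
  induction k with
  | zero =>
    intro i S hik hi hinv
    have : i = row := by omega
    subst this
    rw [show PySem.List.pyRange (i : Int) (i : Int) 1 = [] from
      PySem.List.pyRange_one_eq_nil le_rfl]
    exact hinv
  | succ k ih =>
    intro i S hik hi hinv
    rw [PySem.List.pyRange_one_cons (by omega : (i : Int) < (row : Int))]
    rw [List.foldl_cons]
    have hstep := dpInner_inv M hi (by omega : i < row) (col - 1) 1 S (by omega) (by omega) hinv
    rw [Nat.cast_one] at hstep
    have : ((i : Int) + 1) = ((i + 1 : Nat) : Int) := by omega
    rw [this]
    exact ih (i + 1) _ (by omega) (by omega) (inv_next_row hstep)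


-- ---- initial table ----

theorem pvS0_eq (row col : Nat) :
    (PySem.List.pyRange 0 (row : Int) 1).map
        (fun _ => (PySem.List.pyRange 0 (col : Int) 1).map (fun _ => (0 : Int))) =
      List.replicate row (List.replicate col 0) := by
  rw [PySem.List.pyRange_zero, PySem.List.pyRange_zero]
  simp [Function.comp_def, List.map_const']

theorem inv_init (M : List (List String)) (row col : Nat) :
    pvInv M (List.replicate row (List.replicate col (0 : Int))) row col 1 1 := by
  refine ⟨⟨List.length_replicate, fun r hr => ?_⟩, fun a b ha hb hp => ?_⟩
  · rw [List.eq_of_mem_replicate hr]; exact List.length_replicate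
  · have hab : a = 0 ∨ b = 0 := by rw [pvP_iff] at hp; omega
    have hms : maxSide M a b = 0 := maxSide_min_zero M (by omega)
    rw [hms]
    simp [tabGet, List.getD_eq_getElem?_getD, ha, hb]

-- ---- scan layer: A's full-grid max scan over the table equals B's interior scan ----

theorem scan_row0 (F : List (List Int)) (M : List (List String)) (row col : Nat)
    (hrow : 1 ≤ row) (hF : ∀ a b : Nat, a < row → b < col →
      tabGet F a b = ((maxSide M a b : Nat) : Int)) (k : Nat) :
    ∀ (j : Nat) (st : Int × Int × Int), j + k = col → 0 ≤ st.1 →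
    (PySem.List.pyRange (j : Int) (col : Int) 1).foldl
      (fun st jj => if st.1 < pvGet2 F 0 jj then (pvGet2 F 0 jj, 0, jj) else st) st = st := by
  induction k with
  | zero =>
    intro j st hjk _
    have : j = col := by omega
    subst this
    rw [show PySem.List.pyRange (j : Int) (j : Int) 1 = [] from
      PySem.List.pyRange_one_eq_nil le_rfl]
    rfl
  | succ k ih =>
    intro j st hjk hst
    rw [PySem.List.pyRange_one_cons (by omega : (j : Int) < (col : Int)), List.foldl_cons]
    have hv : pvGet2 F 0 (j : Int) = 0 := by
      rw [show (0 : Int) = ((0 : Nat) : Int) from rfl, pvGet2_natCast,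
        hF 0 j (by omega) (by omega), maxSide_min_zero M (by omega)]
      try rfl
    rw [hv, if_neg (by omega)]
    have : ((j : Int) + 1) = ((j + 1 : Nat) : Int) := by omega
    rw [this]
    exact ih (j + 1) st (by omega) hst

theorem scan_init0 (F : List (List Int)) (M : List (List String)) (row col : Nat)
    (hrow : 1 ≤ row) (hcol : 1 ≤ col)
    (hF : ∀ a b : Nat, a < row → b < col → tabGet F a b = ((maxSide M a b : Nat) : Int)) :
    pvGet2 F (0 : Int) (0 : Int) = (0 : Int) := by
  rw [show (0 : Int) = ((0 : Nat) : Int) from rfl, pvGet2_natCast,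
    hF 0 0 (by omega) (by omega), maxSide_min_zero M (by omega)]
  try rfl

theorem scan_row_eq (F : List (List Int)) (M : List (List String)) (row col : Nat)
    (hF : ∀ a b : Nat, a < row → b < col → tabGet F a b = ((maxSide M a b : Nat) : Int))
    (i : Nat) (hirow : i < row) (k : Nat) :
    ∀ (j : Nat) (st : Int × Int × Int), j + k = col → 0 ≤ st.1 →
    ((PySem.List.pyRange (j : Int) (col : Int) 1).foldl
        (fun st jj => if st.1 < pvGet2 F (i : Int) jj then (pvGet2 F (i : Int) jj, (i : Int), jj) else st) st =
      (PySem.List.pyRange (j : Int) (col : Int) 1).foldl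
        (fun st jj =>
          if st.1 < pvGrow M (i : Int) jj 0 (min (i : Int) jj).toNat then
            (pvGrow M (i : Int) jj 0 (min (i : Int) jj).toNat, (i : Int), jj)
          else st) st) ∧
    0 ≤ ((PySem.List.pyRange (j : Int) (col : Int) 1).foldl
        (fun st jj => if st.1 < pvGet2 F (i : Int) jj then (pvGet2 F (i : Int) jj, (i : Int), jj) else st) st).1 := by
  induction k with
  | zero =>
    intro j st hjk hst
    have : j = col := by omega
    subst this
    rw [show PySem.List.pyRange (j : Int) (j : Int) 1 = [] from
      PySem.List.pyRange_one_eq_nil le_rfl]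
    exact ⟨rfl, hst⟩
  | succ k ih =>
    intro j st hjk hst
    rw [PySem.List.pyRange_one_cons (by omega : (j : Int) < (col : Int)), List.foldl_cons,
      List.foldl_cons]
    have hv : pvGet2 F (i : Int) (j : Int) = ((maxSide M i j : Nat) : Int) := by
      rw [pvGet2_natCast, hF i j hirow (by omega)]
    have hg : pvGrow M (i : Int) (j : Int) 0 (min (i : Int) (j : Int)).toNat =
        ((maxSide M i j : Nat) : Int) := pvGrow_val M i j
    have hcast : ((j : Int) + 1) = ((j + 1 : Nat) : Int) := by omega
    rw [hv, hg, hcast]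
    by_cases hlt : st.1 < ((maxSide M i j : Nat) : Int)
    · rw [if_pos hlt]
      exact ih (j + 1) _ (by omega) (by positivity)
    · rw [if_neg hlt]
      exact ih (j + 1) st (by omega) hst

theorem scan_outer_eq (F : List (List Int)) (M : List (List String)) (row col : Nat)
    (hcol : 1 ≤ col)
    (hF : ∀ a b : Nat, a < row → b < col → tabGet F a b = ((maxSide M a b : Nat) : Int))
    (k : Nat) :
    ∀ (i : Nat) (st : Int × Int × Int), i + k = row → 1 ≤ i → 0 ≤ st.1 →
    (PySem.List.pyRange (i : Int) (row : Int) 1).foldl (fun st ii =>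
        (PySem.List.pyRange 0 (col : Int) 1).foldl
          (fun st jj => if st.1 < pvGet2 F ii jj then (pvGet2 F ii jj, ii, jj) else st) st) st =
    (PySem.List.pyRange (i : Int) (row : Int) 1).foldl (fun st ii =>
        (PySem.List.pyRange 1 (col : Int) 1).foldl
          (fun st jj =>
            if st.1 < pvGrow M ii jj 0 (min ii jj).toNat then
              (pvGrow M ii jj 0 (min ii jj).toNat, ii, jj)
            else st) st) st := by
  induction k with
  | zero =>
    intro i st hik hi hst
    have : i = row := by omega
    subst this
    rw [show PySem.List.pyRange (i : Int) (i : Int) 1 = [] from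
      PySem.List.pyRange_one_eq_nil le_rfl]
    rfl
  | succ k ih =>
    intro i st hik hi hst
    rw [PySem.List.pyRange_one_cons (by omega : (i : Int) < (row : Int)), List.foldl_cons,
      List.foldl_cons]
    obtain ⟨hrow_eq, hrow_pos⟩ := scan_row_eq F M row col hF i (by omega) (col - 1) 1 st
      (by omega) hst
    rw [Nat.cast_one] at hrow_eq hrow_pos
    have hrowfull : (PySem.List.pyRange 0 (col : Int) 1).foldl
        (fun st jj => if st.1 < pvGet2 F (i : Int) jj then (pvGet2 F (i : Int) jj, (i : Int), jj) else st) st =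
        (PySem.List.pyRange 1 (col : Int) 1).foldl
          (fun st jj =>
            if st.1 < pvGrow M (i : Int) jj 0 (min (i : Int) jj).toNat then
              (pvGrow M (i : Int) jj 0 (min (i : Int) jj).toNat, (i : Int), jj)
            else st) st := by
      rw [PySem.List.pyRange_one_cons (by omega : (0 : Int) < (col : Int)), List.foldl_cons]
      have hv0 : pvGet2 F (i : Int) (0 : Int) = 0 := by
        rw [show (0 : Int) = ((0 : Nat) : Int) from rfl, pvGet2_natCast,
          hF i 0 (by omega) (by omega), maxSide_min_zero M (by omega)]
        try rfl
      rw [hv0, if_neg (by omega)]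
      exact hrow_eq
    rw [hrowfull]
    rw [hrow_eq] at hrow_pos
    have : ((i : Int) + 1) = ((i + 1 : Nat) : Int) := by omega
    rw [this]
    exact ih (i + 1) _ (by omega) (by omega) hrow_pos

-- ---- stamping: both ports write the same '#' cells in the same order ----

theorem stamp_eq (M : List (List String)) (s bi bj : Int) :
    (PySem.List.pyRange bi (bi - s) (-1)).foldl (fun Macc ii =>
        (PySem.List.pyRange bj (bj - s) (-1)).foldl (fun Macc jj => pvSet2 Macc ii jj "#") Macc) M =
    (PySem.List.pyRange 0 s 1).foldl (fun Macc a =>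
        (PySem.List.pyRange 0 s 1).foldl (fun Macc b =>
          pvSet2 Macc (bi - a) (bj - b) "#") Macc) M := by
  rw [PySem.List.pyRange_neg_one bi (bi - s), PySem.List.pyRange_neg_one bj (bj - s),
    PySem.List.pyRange_zero s]
  simp only [sub_sub_cancel, List.foldl_map]

-- PVGROWMARK
-- ===== VERDICT (by name: the statement is the Claim_ definition above) =====
theorem findSeq_spec : Claim_equal_findSeq := by
  intro M _ hpre
  obtain ⟨hM, hh, _⟩ := hpre
  unfold Spec_findSeq
  have hrow : 1 ≤ M.length := by cases M with | nil => exact absurd rfl hM | cons a t => simp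
  have hcol : 1 ≤ M.headI.length := by
    cases hx : M.headI with
    | nil => exact absurd hx hh
    | cons a t => simp
  have hcol0 : PySem.List.pyGetD M 0 [] = M.headI := by
    rw [PySem.List.pyGetD_zero]
    cases M with | nil => exact absurd rfl hM | cons a t => rfl
  simp only [findSeq, findSeq_alt, hcol0]
  rw [pvS0_eq M.length M.headI.length]
  have hInv := dpOuter_inv M (row := M.length) hcol (M.length - 1) 1
    (List.replicate M.length (List.replicate M.headI.length 0)) (by omega) (by omega)
    (inv_init M M.length M.headI.length)
  rw [Nat.cast_one] at hInv
  have hF := fun a b ha hb => hInv.2 a b ha hb (by rw [pvP_iff]; omega)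
  rw [scan_init0 _ M M.length M.headI.length (by omega) (by omega) hF]
  rw [PySem.List.pyRange_one_cons (by omega : (0 : Int) < (M.length : Int)), List.foldl_cons]
  have h0 := scan_row0 _ M M.length M.headI.length (by omega) hF M.headI.length 0
    ((0 : Int), (0 : Int), (0 : Int)) (by omega) (by norm_num)
  rw [Nat.cast_zero] at h0
  rw [h0]
  have hscan := scan_outer_eq _ M M.length M.headI.length hcol hF (M.length - 1) 1
    ((0 : Int), (0 : Int), (0 : Int)) (by omega) (by omega) (by norm_num)
  rw [Nat.cast_one] at hscan
  rw [show ((0 : Int) + 1) = (1 : Int) by norm_num]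
  rw [hscan]
  rw [stamp_eq]
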